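-- pv_equiv track=rewrite | github.com/Sayantand938/anki-cli | src/task_engine.py | get_subject_from_tags
-- ===== SOURCE A (Python) =====
-- TARGET_SUBJECTS = ["ENG", "MATH", "GK", "GI"]
--
-- def get_subject_from_tags(tag_string):
--     """Returns a TARGET_SUBJECT if found, otherwise returns "Others"."""
--     if not tag_string: return "Others"
--     tags_list = tag_string.strip().split()
--     for tag in tags_list:
--         for subject in TARGET_SUBJECTS:
--             if tag == subject or tag.startswith(f"{subject}::"):
--                 return subject
--     return "Others"
-- ===== SOURCE B (Python) =====
-- TARGET_SUBJECTS = ["ENG", "MATH", "GK", "GI"]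
--
-- def get_subject_from_tags(tag_string):
--     """Returns a TARGET_SUBJECT if found, otherwise returns "Others"."""
--     if not tag_string:
--         return "Others"
--     heads = [tag.partition("::")[0] for tag in tag_string.strip().split()]
--     hits = [(heads.index(s), s) for s in TARGET_SUBJECTS if s in heads]
--     if not hits:
--         return "Others"
--     return min(hits, key=lambda p: p[0])[1]
-- ===== Notes on version B (the rewrite author's own statement) =====
-- stated objective: alternative
-- what changed: Replaces A's early-exit nested scan (outer loop over tags, inner equality/'subject::'-prefix test per subject) with a staged, transposed computation: first materialize the list of '::'-heads, then loop over the SUBJECTS using list.index to get each subject's first-occurrence position, and finally select the subject with the minimal position via min; there is no per-tag early return at all.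
import Mathlib
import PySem

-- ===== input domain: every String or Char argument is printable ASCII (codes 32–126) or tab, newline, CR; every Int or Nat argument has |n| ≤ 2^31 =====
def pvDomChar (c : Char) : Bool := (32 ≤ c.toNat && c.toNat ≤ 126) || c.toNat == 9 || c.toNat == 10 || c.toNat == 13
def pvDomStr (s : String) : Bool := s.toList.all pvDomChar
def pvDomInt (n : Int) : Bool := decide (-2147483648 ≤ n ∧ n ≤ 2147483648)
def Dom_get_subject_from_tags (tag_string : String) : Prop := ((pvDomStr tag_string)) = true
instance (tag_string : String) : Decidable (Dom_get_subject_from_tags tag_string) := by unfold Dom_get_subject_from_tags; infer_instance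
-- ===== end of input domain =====

-- B replaces A's early-exit nested tag/subject scan with a staged, transposed computation:
-- materialize the heads list, loop over the SUBJECTS with list.index, pick the minimal index.

-- ===== PORT A =====
def pvTargetSubjects : List String := ["ENG", "MATH", "GK", "GI"]

-- A's inner 'for subject in TARGET_SUBJECTS' loop: first matching subject, if any
def pvInnerA (tag : String) : List String → Option String
  | [] => none
  | s :: rest =>
      if tag = s ∨ PySem.Str.startswith tag (s ++ "::") = true then some s
      else pvInnerA tag rest

-- A's outer 'for tag in tags_list' loop
def pvLoopA : List String → String
  | [] => "Others"
  | tag :: rest =>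
      match pvInnerA tag pvTargetSubjects with
      | some s => s
      | none => pvLoopA rest

def get_subject_from_tags (tag_string : String) : String :=
  if tag_string = "" then "Others"
  else pvLoopA (PySem.Str.split₀ (PySem.Str.strip tag_string))

-- ===== PORT B =====
-- hand port of tag.partition("::")[0] (PySem has no partition): exactly the characters
-- before the first occurrence of "::", the whole string if there is none.
def pvHeadSep : List Char → List Char
  | [] => []
  | c :: cs => if [':', ':'].isPrefixOf (c :: cs) then [] else c :: pvHeadSep cs

-- the list comprehension '[(heads.index(s), s) for s in TARGET_SUBJECTS if s in heads]';
-- heads.index(s) is guarded by 's in heads', so index? is some and the getD default is never used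
def pvHits (heads : List String) : List (Nat × String) :=
  (pvTargetSubjects.filter (fun s => s ∈ heads)).map
    (fun s => ((PySem.List.index? heads s).getD 0, s))

def get_subject_from_tags_alt (tag_string : String) : String :=
  if tag_string = "" then "Others"
  else
    let heads := (PySem.Str.split₀ (PySem.Str.strip tag_string)).map
      (fun t => String.ofList (pvHeadSep t.toList))
    match PySem.List.min? (pvHits heads) (fun p => p.1) with
    | some p => p.2
    | none => "Others"

-- ===== PRECONDITION & SPEC =====
def Spec_get_subject_from_tags (tag_string : String) (out : String) : Prop := out = get_subject_from_tags_alt tag_string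
instance (tag_string : String) (out : String) : Decidable (Spec_get_subject_from_tags tag_string out) := by unfold Spec_get_subject_from_tags; infer_instance

-- ===== CLAIM (what is proved, stated in full; the proofs are below) =====
def Claim_equal_get_subject_from_tags : Prop := ∀ (tag_string : String), Dom_get_subject_from_tags tag_string → Spec_get_subject_from_tags tag_string (get_subject_from_tags tag_string)

-- ===== LEMMAS AND PROOFS =====

-- the first-match scan over the heads list: the common reference point of both proofs
def pvScan : List String → String
  | [] => "Others"
  | h :: rest => if h ∈ pvTargetSubjects then h else pvScan rest

theorem pvHeadSep_append (s t : List Char) (h : ':' ∉ s) :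
    pvHeadSep (s ++ t) = s ++ pvHeadSep t := by
  induction s with
  | nil => rfl
  | cons c cs ih =>
    simp only [List.mem_cons, not_or] at h
    obtain ⟨h1, h2⟩ := h
    simp [pvHeadSep, List.isPrefixOf, ih h2]
    exact fun e => absurd e h1

theorem pvHeadSep_colon2 (r : List Char) : pvHeadSep (':' :: ':' :: r) = [] := by
  simp [pvHeadSep, List.isPrefixOf]

theorem pvHeadSep_recon (s : List Char) :
    pvHeadSep s = s ∨ ∃ r, s = pvHeadSep s ++ ':' :: ':' :: r := by
  induction s with
  | nil => left; rfl
  | cons c cs ih =>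
    by_cases hp : [':', ':'].isPrefixOf (c :: cs)
    · right
      obtain ⟨r, hr⟩ := List.isPrefixOf_iff_prefix.mp hp
      refine ⟨r, ?_⟩
      have h0 : pvHeadSep (c :: cs) = [] := by simp [pvHeadSep, hp]
      rw [h0]
      simpa using hr.symm
    · rcases ih with h | ⟨r, hr⟩
      · left; simp [pvHeadSep, hp, h]
      · right
        refine ⟨r, ?_⟩
        simp only [pvHeadSep, hp]
        exact congrArg (c :: ·) hr

theorem pvHead_char (S tag : List Char) (hS : ':' ∉ S) :
    (tag = S ∨ S ++ [':', ':'] <+: tag) ↔ pvHeadSep tag = S := by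
  constructor
  · intro hc
    rcases hc with hc | ⟨r, hr⟩
    · rw [hc]
      simpa [pvHeadSep] using pvHeadSep_append S [] hS
    · subst hr
      rw [List.append_assoc, pvHeadSep_append S _ hS]
      simp [pvHeadSep_colon2]
  · intro h
    rcases pvHeadSep_recon tag with h2 | ⟨r, hr⟩
    · left; rw [← h, h2]
    · right
      rw [hr, h]
      exact ⟨r, by simp⟩

theorem pvCond_iff (S tag : String) (hS : ':' ∉ S.toList) :
    (tag = S ∨ PySem.Str.startswith tag (S ++ "::") = true) ↔ pvHeadSep tag.toList = S.toList := by
  have hcc : ("::" : String).toList = [':', ':'] := rfl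
  rw [PySem.Str.startswith_eq, PySem.Chars.startswith_iff, String.toList_append, hcc,
      String.ext_iff]
  exact pvHead_char S.toList tag.toList hS

theorem pvInner_eq (tag : String) :
    pvInnerA tag pvTargetSubjects =
      (if String.ofList (pvHeadSep tag.toList) ∈ pvTargetSubjects then
        some (String.ofList (pvHeadSep tag.toList)) else none) := by
  have e1 := pvCond_iff "ENG" tag (by decide)
  have e2 := pvCond_iff "MATH" tag (by decide)
  have e3 := pvCond_iff "GK" tag (by decide)
  have e4 := pvCond_iff "GI" tag (by decide)
  simp only [pvTargetSubjects, pvInnerA]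
  by_cases h1 : pvHeadSep tag.toList = "ENG".toList
  · rw [if_pos (e1.mpr h1), h1]; simp
  · rw [if_neg (fun c => h1 (e1.mp c))]
    by_cases h2 : pvHeadSep tag.toList = "MATH".toList
    · rw [if_pos (e2.mpr h2), h2]; simp
    · rw [if_neg (fun c => h2 (e2.mp c))]
      by_cases h3 : pvHeadSep tag.toList = "GK".toList
      · rw [if_pos (e3.mpr h3), h3]; simp
      · rw [if_neg (fun c => h3 (e3.mp c))]
        by_cases h4 : pvHeadSep tag.toList = "GI".toList
        · rw [if_pos (e4.mpr h4), h4]; simp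
        · rw [if_neg (fun c => h4 (e4.mp c))]
          have hmem : String.ofList (pvHeadSep tag.toList) ∉ (["ENG", "MATH", "GK", "GI"] : List String) := by
            intro hm
            simp only [List.mem_cons, List.not_mem_nil, or_false] at hm
            rcases hm with hm | hm | hm | hm
            · exact h1 (by have := congrArg String.toList hm; simpa using this)
            · exact h2 (by have := congrArg String.toList hm; simpa using this)
            · exact h3 (by have := congrArg String.toList hm; simpa using this)
            · exact h4 (by have := congrArg String.toList hm; simpa using this)
          rw [if_neg hmem]

-- A's double loop is the first-match scan over the heads
theorem pvLoopA_eq_scan (ts : List String) :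
    pvLoopA ts = pvScan (ts.map (fun t => String.ofList (pvHeadSep t.toList))) := by
  induction ts with
  | nil => rfl
  | cons tag rest ih =>
    simp only [pvLoopA, List.map_cons, pvScan, pvInner_eq tag]
    by_cases hm : String.ofList (pvHeadSep tag.toList) ∈ pvTargetSubjects
    · simp [hm]
    · simp [hm, ih]

-- membership characterisation of the hits list
theorem mem_pvHits (heads : List String) (k : Nat) (s : String) :
    (k, s) ∈ pvHits heads ↔ s ∈ pvTargetSubjects ∧ PySem.List.index? heads s = some k := by
  simp only [pvHits, List.mem_map, List.mem_filter, decide_eq_true_eq]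
  constructor
  · rintro ⟨x, ⟨hx, hmem⟩, heq⟩
    have hxs : x = s := congrArg Prod.snd heq
    subst hxs
    have hk : (PySem.List.index? heads x).getD 0 = k := congrArg Prod.fst heq
    cases hcase : PySem.List.index? heads x with
    | none => exact absurd ((PySem.List.index?_eq_none_iff heads x).mp hcase) (by simpa using hmem)
    | some i =>
      refine ⟨hx, ?_⟩
      rw [hcase] at hk
      simpa using hk
  · rintro ⟨hs, hidx⟩
    refine ⟨s, ⟨hs, ?_⟩, ?_⟩
    · by_contra hns
      rw [(PySem.List.index?_eq_none_iff heads s).mpr hns] at hidx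
      cases hidx
    · rw [hidx]; rfl

-- a hit's index points at its subject in heads
theorem pvHits_getElem (heads : List String) (k : Nat) (s : String)
    (h : (k, s) ∈ pvHits heads) : ∃ hk : k < heads.length, heads[k] = s := by
  obtain ⟨_, hidx⟩ := (mem_pvHits heads k s).mp h
  obtain ⟨hk, he, _⟩ := PySem.List.getElem_of_index?_eq_some hidx
  exact ⟨hk, he⟩

-- shifting: hits of (h :: rest) when h is not a subject
theorem mem_pvHits_cons (h : String) (rest : List String) (hh : h ∉ pvTargetSubjects)
    (k : Nat) (s : String) :
    (k, s) ∈ pvHits (h :: rest) ↔ ∃ j, (j, s) ∈ pvHits rest ∧ k = j + 1 := by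
  constructor
  · intro hm
    obtain ⟨hs, hidx⟩ := (mem_pvHits _ _ _).mp hm
    have hne : h ≠ s := fun e => hh (e ▸ hs)
    rw [PySem.List.index?_cons_of_ne rest hne] at hidx
    obtain ⟨j, hj, hk⟩ := Option.map_eq_some_iff.mp hidx
    exact ⟨j, (mem_pvHits _ _ _).mpr ⟨hs, hj⟩, hk.symm⟩
  · rintro ⟨j, hj, rfl⟩
    obtain ⟨hs, hidx⟩ := (mem_pvHits _ _ _).mp hj
    have hne : h ≠ s := fun e => hh (e ▸ hs)
    exact (mem_pvHits _ _ _).mpr ⟨hs, by rw [PySem.List.index?_cons_of_ne rest hne, hidx]; rfl⟩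

-- equal-index hits name the same subject
theorem pvHits_key_inj (heads : List String) (k : Nat) (s1 s2 : String)
    (h1 : (k, s1) ∈ pvHits heads) (h2 : (k, s2) ∈ pvHits heads) : s1 = s2 := by
  obtain ⟨hk1, he1⟩ := pvHits_getElem heads k s1 h1
  obtain ⟨hk2, he2⟩ := pvHits_getElem heads k s2 h2
  rw [← he1, ← he2]

def pvPick (heads : List String) : String :=
  match PySem.List.min? (pvHits heads) (fun p => p.1) with
  | some p => p.2
  | none => "Others"

-- selecting the minimal first-occurrence index IS the first-match scan
theorem pvScan_eq_pick (heads : List String) : pvScan heads = pvPick heads := by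
  induction heads with
  | nil =>
    simp only [pvScan, pvPick]
    have : pvHits ([] : List String) = [] := by decide
    rw [this]
    rfl
  | cons h rest ih =>
    by_cases hh : h ∈ pvTargetSubjects
    · -- (0, h) is a hit, and it is the unique minimum
      have h0 : (0, h) ∈ pvHits (h :: rest) :=
        (mem_pvHits _ _ _).mpr ⟨hh, PySem.List.index?_cons_self h rest⟩
      have hne : pvHits (h :: rest) ≠ [] := fun e => by rw [e] at h0; exact absurd h0 (List.not_mem_nil)
      obtain ⟨m, hm⟩ : ∃ m, PySem.List.min? (pvHits (h :: rest)) (fun p => p.1) = some m := by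
        cases hmin : PySem.List.min? (pvHits (h :: rest)) (fun p => p.1) with
        | none => exact absurd (((PySem.List.min?_eq_none_iff _ _).mp hmin)) hne
        | some m => exact ⟨m, rfl⟩
      have hmem : m ∈ pvHits (h :: rest) := PySem.List.min?_mem hm
      have hle : m.1 ≤ 0 := PySem.List.min?_isMin hm (0, h) h0
      have hm1 : m.1 = 0 := Nat.le_zero.mp hle
      have : m.2 = h := by
        have := pvHits_key_inj (h :: rest) 0 m.2 h (by rw [← hm1]; exact hmem) h0
        exact this
      simp only [pvScan, if_pos hh, pvPick, hm, this]
    · -- every hit of (h :: rest) is a shifted hit of rest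
      simp only [pvScan, if_neg hh, pvPick, ih]
      cases hmin : PySem.List.min? (pvHits rest) (fun p => p.1) with
      | none =>
        have hrest : pvHits rest = [] := (PySem.List.min?_eq_none_iff _ _).mp hmin
        have hcons : pvHits (h :: rest) = [] := by
          rw [List.eq_nil_iff_forall_not_mem]
          rintro ⟨k, s⟩ hk
          obtain ⟨j, hj, _⟩ := (mem_pvHits_cons h rest hh k s).mp hk
          rw [hrest] at hj
          exact absurd hj (List.not_mem_nil)
        rw [(PySem.List.min?_eq_none_iff _ _).mpr hcons]
      | some m =>
        have hmmem : m ∈ pvHits rest := PySem.List.min?_mem hmin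
        have hcmem : (m.1 + 1, m.2) ∈ pvHits (h :: rest) :=
          (mem_pvHits_cons h rest hh _ _).mpr ⟨m.1, by simpa using hmmem, rfl⟩
        have hne : pvHits (h :: rest) ≠ [] := fun e => by rw [e] at hcmem; exact absurd hcmem (List.not_mem_nil)
        obtain ⟨m', hm'⟩ : ∃ m', PySem.List.min? (pvHits (h :: rest)) (fun p => p.1) = some m' := by
          cases hmin2 : PySem.List.min? (pvHits (h :: rest)) (fun p => p.1) with
          | none => exact absurd (((PySem.List.min?_eq_none_iff _ _).mp hmin2)) hne
          | some x => exact ⟨x, rfl⟩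
        have hm'mem : m' ∈ pvHits (h :: rest) := PySem.List.min?_mem hm'
        obtain ⟨j, hj, hk⟩ := (mem_pvHits_cons h rest hh m'.1 m'.2).mp (by simpa using hm'mem)
        -- j is a minimum of the rest hits
        have hjmin : ∀ z ∈ pvHits rest, j ≤ z.1 := by
          rintro ⟨zk, zs⟩ hz
          have : (zk + 1, zs) ∈ pvHits (h :: rest) :=
            (mem_pvHits_cons h rest hh _ _).mpr ⟨zk, hz, rfl⟩
          have := PySem.List.min?_isMin hm' (zk + 1, zs) this
          omega
        have hmm : m.1 ≤ j := PySem.List.min?_isMin hmin (j, m'.2) hj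
        have hjm : j ≤ m.1 := hjmin m hmmem
        have hje : j = m.1 := Nat.le_antisymm hjm hmm
        have hs : m'.2 = m.2 := pvHits_key_inj rest m.1 m'.2 m.2 (hje ▸ hj) hmmem
        rw [hm']
        simpa using hs.symm

-- ===== VERDICT (by name: the statement is the Claim_ definition above) =====
theorem get_subject_from_tags_spec : Claim_equal_get_subject_from_tags := by
  intro tag_string _hdom
  unfold Spec_get_subject_from_tags get_subject_from_tags get_subject_from_tags_alt
  split_ifs
  · rfl
  · rw [pvLoopA_eq_scan, pvScan_eq_pick]
    simp only [pvPick]
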